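-- pv_equiv track=rewrite | github.com/the-omega-institute/automath | papers/publication/submitted_2026_upper_fibers_witness_covers_fibonacci_apparition_rj/scripts/compute_birth_layer_table.py | alpha_for_Fn_divisor
-- ===== SOURCE A (Python) =====
-- def fib_mod(n, m):
--     """Compute F_n mod m."""
--     if m == 1:
--         return 0
--     if n <= 0:
--         return 0
--     a, b = 0, 1
--     for _ in range(n - 1):
--         a, b = b, (a + b) % m
--     return b % m
--
-- def factorize(n):
--     """Return sorted list of (prime, exponent) pairs."""
--     if n <= 1:
--         return []
--     factors = []
--     d = 2
--     while d * d <= n: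
--         if n % d == 0:
--             e = 0
--             while n % d == 0:
--                 e += 1
--                 n //= d
--             factors.append((d, e))
--         d += 1
--     if n > 1:
--         factors.append((n, 1))
--     return factors
--
-- def get_divisors(n):
--     """Return sorted list of all positive divisors of n."""
--     if n <= 0:
--         return []
--     if n == 1:
--         return [1]
--     factors = factorize(n)
--     divs = [1]
--     for p, e in factors:
--         new_divs = []
--         for d in divs:
--             pe = 1
--             for _ in range(e + 1):
--                 new_divs.append(d * pe)
--                 pe *= p
--         divs = new_divs
--     return sorted(divs)
--
-- def alpha_for_Fn_divisor(q, n):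
--     """Given that q | F_n, compute alpha(q) = min d | n with q | F_d."""
--     if q == 1:
--         return 1
--     divs_n = sorted(get_divisors(n))
--     for d in divs_n:
--         if d >= 1 and fib_mod(d, q) == 0:
--             return d
--     return n
-- ===== SOURCE B (Python) =====
-- def _fib_pair_mod(k, m):
--     # (F_k mod m, F_{k+1} mod m) by fast doubling
--     if k == 0:
--         return (0 % m, 1 % m)
--     a, b = _fib_pair_mod(k // 2, m)
--     c = (a * (2 * b - a)) % m
--     d = (a * a + b * b) % m
--     if k % 2 == 0:
--         return (c, d)
--     return (d, (c + d) % m)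
--
-- def alpha_for_Fn_divisor(q, n):
--     if q == 1:
--         return 1
--     if n <= 0:
--         return n
--     small = []
--     i = 1
--     while i * i <= n:
--         if n % i == 0:
--             small.append(i)
--         i += 1
--     divs = small + [n // d for d in reversed(small) if n // d != d]
--     for d in divs:
--         if _fib_pair_mod(d, q)[0] == 0:
--             return d
--     return n
-- ===== Notes on version B (the rewrite author's own statement) =====
-- stated objective: faster
-- what changed: B enumerates divisors in sorted order by a sqrt(n) two-list scan (small divisors plus reversed codivisors) instead of A's prime-factorization product plus sort, and tests q | F_d with O(log d) fast-doubling Fibonacci mod q instead of A's d-step linear Fibonacci loop.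
import Mathlib
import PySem

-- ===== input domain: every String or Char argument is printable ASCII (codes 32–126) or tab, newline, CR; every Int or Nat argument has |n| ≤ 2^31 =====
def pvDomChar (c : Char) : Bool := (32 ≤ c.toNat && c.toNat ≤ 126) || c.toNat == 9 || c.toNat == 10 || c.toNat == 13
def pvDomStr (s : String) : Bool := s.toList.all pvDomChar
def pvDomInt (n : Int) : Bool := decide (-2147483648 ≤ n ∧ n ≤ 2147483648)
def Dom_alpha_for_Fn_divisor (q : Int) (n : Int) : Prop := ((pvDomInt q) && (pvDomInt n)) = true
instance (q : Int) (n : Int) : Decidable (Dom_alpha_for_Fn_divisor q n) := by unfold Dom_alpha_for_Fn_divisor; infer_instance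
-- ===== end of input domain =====

-- B replaces A's prime-factorization divisor product + sort by a sqrt(n) two-list divisor
-- scan, and A's linear Fibonacci loop by fast-doubling Fibonacci mod q (objective: faster).

-- ===== PORT A =====
-- fib_mod(n, m): the linear a,b loop over range(n-1)
def fibModA (nn m : Int) : Int :=
  if m = 1 then 0
  else if nn ≤ 0 then 0
  else
    let st := (PySem.List.pyRange 0 (nn - 1) 1).foldl
      (fun (ab : Int × Int) _ => (ab.2, PySem.Int.mod (ab.1 + ab.2) m)) (0, 1)
    PySem.Int.mod st.2 m

-- n // d shrinks for d ≥ 2 (used only for termination)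
theorem pvEdivLt (n d : Int) (hn : 1 ≤ n) (hd : 2 ≤ d) : n / d < n := by
  have hq0 : 0 ≤ n / d := Int.ediv_nonneg (by omega) (by omega)
  have h := Int.ediv_add_emod n d
  have hr : 0 ≤ n % d := Int.emod_nonneg n (by omega)
  nlinarith [mul_le_mul_of_nonneg_right hd hq0]

-- inner 'while n % d == 0' of factorize; the 2 ≤ d / 1 ≤ n conjuncts only make the
-- recursion total (they hold at every reachable call) — same computation as the Python.
def divideOutA (n d e : Int) : Int × Int :=
  if h : 2 ≤ d ∧ 1 ≤ n ∧ PySem.Int.mod n d = 0 then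
    divideOutA (PySem.Int.floordiv n d) d (e + 1)
  else (n, e)
termination_by n.toNat
decreasing_by
  obtain ⟨hd, hn, hm⟩ := h
  have h2 : PySem.Int.floordiv n d = n / d := PySem.Int.floordiv_eq_ediv_of_pos (by omega)
  have h3 : n / d < n := pvEdivLt n d hn hd
  have h4 : 0 ≤ n / d := Int.ediv_nonneg (by omega) (by omega)
  omega

-- needed by factorizeLoopA's termination proof
theorem divideOutA_fst_le (n d e : Int) : (divideOutA n d e).1 ≤ n := by
  rw [divideOutA]
  by_cases hc : 2 ≤ d ∧ 1 ≤ n ∧ PySem.Int.mod n d = 0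
  · rw [dif_pos hc]
    obtain ⟨hd, hn, hm⟩ := hc
    have h2 : PySem.Int.floordiv n d = n / d := PySem.Int.floordiv_eq_ediv_of_pos (by omega)
    have h3 : n / d < n := pvEdivLt n d hn hd
    have := divideOutA_fst_le (PySem.Int.floordiv n d) d (e + 1)
    omega
  · rw [dif_neg hc]
termination_by n.toNat
decreasing_by
  obtain ⟨hd, hn, hm⟩ := hc
  have h2 : PySem.Int.floordiv n d = n / d := PySem.Int.floordiv_eq_ediv_of_pos (by omega)
  have h3 : n / d < n := pvEdivLt n d hn hd
  have h4 : 0 ≤ n / d := Int.ediv_nonneg (by omega) (by omega)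
  omega

-- the 'while d * d <= n' loop of factorize
def factorizeLoopA (n d : Int) (acc : List (Int × Int)) : List (Int × Int) × Int :=
  if h : d * d ≤ n then
    if PySem.Int.mod n d = 0 then
      let r := divideOutA n d 0
      factorizeLoopA r.1 (d + 1) (acc ++ [(d, r.2)])
    else factorizeLoopA n (d + 1) acc
  else (acc, n)
termination_by (n + 1 - d).toNat
decreasing_by
  · have hdn : d ≤ n := by nlinarith [sq_nonneg d, sq_nonneg (d - 1)]
    have := divideOutA_fst_le n d 0
    omega
  · have hdn : d ≤ n := by nlinarith [sq_nonneg d, sq_nonneg (d - 1)]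
    omega

def factorizeA (n : Int) : List (Int × Int) :=
  if n ≤ 1 then []
  else
    let r := factorizeLoopA n 2 []
    if 1 < r.2 then r.1 ++ [(r.2, 1)] else r.1

def getDivisorsA (n : Int) : List Int :=
  if n ≤ 0 then []
  else if n = 1 then [1]
  else
    let divs := (factorizeA n).foldl
      (fun divs pe =>
        divs.foldl
          (fun nd d =>
            ((PySem.List.pyRange 0 (pe.2 + 1) 1).foldl
              (fun (st : List Int × Int) _ => (st.1 ++ [d * st.2], st.2 * pe.1)) (nd, 1)).1)
          [])
      [1]
    PySem.List.sorted divs (fun x => x) false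

def alpha_for_Fn_divisor (q : Int) (n : Int) : Int :=
  if q = 1 then 1
  else
    let divs := PySem.List.sorted (getDivisorsA n) (fun x => x) false
    match divs.find? (fun d => decide (1 ≤ d) && decide (fibModA d q = 0)) with
    | some d => d
    | none => n

-- ===== PORT B =====
-- _fib_pair_mod(k, m): fast doubling, recursion on k // 2 (k is a Python non-negative int
-- here; ported with k : Nat so k // 2 is Nat division — exact for k ≥ 0)
def fibPairB (k : Nat) (m : Int) : Int × Int :=
  if k = 0 then (PySem.Int.mod 0 m, PySem.Int.mod 1 m)
  else
    let ab := fibPairB (k / 2) m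
    let c := PySem.Int.mod (ab.1 * (2 * ab.2 - ab.1)) m
    let d := PySem.Int.mod (ab.1 * ab.1 + ab.2 * ab.2) m
    if k % 2 = 0 then (c, d) else (d, PySem.Int.mod (c + d) m)
termination_by k
decreasing_by omega

-- the 'while i * i <= n' small-divisor loop of B
def smallLoopB (n i : Int) (acc : List Int) : List Int :=
  if h : i * i ≤ n then
    smallLoopB n (i + 1) (if PySem.Int.mod n i = 0 then acc ++ [i] else acc)
  else acc
termination_by (n + 1 - i).toNat
decreasing_by
  have hin : i ≤ n := by nlinarith [sq_nonneg i, sq_nonneg (i - 1)]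
  omega

def alpha_for_Fn_divisor_alt (q : Int) (n : Int) : Int :=
  if q = 1 then 1
  else if n ≤ 0 then n
  else
    let small := smallLoopB n 1 []
    let divs := small ++
      ((small.reverse.filter (fun d => PySem.Int.floordiv n d ≠ d)).map
        (fun d => PySem.Int.floordiv n d))
    match divs.find? (fun d => decide ((fibPairB d.toNat q).1 = 0)) with
    | some d => d
    | none => n

-- ===== PRECONDITION & SPEC =====
-- Pre_ excludes exactly q = 0 with n ≥ 1: there the Python A (and B) raises ZeroDivisionError
-- in the `% q` of its Fibonacci computation.
def Pre_alpha_for_Fn_divisor (q : Int) (n : Int) : Prop := ¬(q = 0 ∧ 1 ≤ n)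
instance (q : Int) (n : Int) : Decidable (Pre_alpha_for_Fn_divisor q n) := by
  unfold Pre_alpha_for_Fn_divisor; infer_instance

def pvWitness_alpha_for_Fn_divisor : Int × Int := (2, 12)

def Spec_alpha_for_Fn_divisor (q : Int) (n : Int) (out : Int) : Prop := out = alpha_for_Fn_divisor_alt q n
instance (q : Int) (n : Int) (out : Int) : Decidable (Spec_alpha_for_Fn_divisor q n out) := by unfold Spec_alpha_for_Fn_divisor; infer_instance

-- ===== CLAIM (what is proved, stated in full; the proofs are below) =====
def Claim_equal_alpha_for_Fn_divisor : Prop := ∀ (q : Int) (n : Int), Dom_alpha_for_Fn_divisor q n → Pre_alpha_for_Fn_divisor q n → Spec_alpha_for_Fn_divisor q n (alpha_for_Fn_divisor q n)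

-- ===== LEMMAS AND PROOFS =====

-- Section 1: Python % is congruent to its argument
theorem pvModCongr (x m : Int) : x ≡ PySem.Int.mod x m [ZMOD m] := by
  rw [Int.modEq_iff_dvd]
  have h := PySem.Int.floordiv_mul_add_mod x m
  exact ⟨-(PySem.Int.floordiv x m), by linarith⟩

theorem pvDvdIffOfModEq {a b m : Int} (h : a ≡ b [ZMOD m]) : m ∣ a ↔ m ∣ b := by
  rw [← Int.modEq_zero_iff_dvd, ← Int.modEq_zero_iff_dvd]
  exact ⟨fun h2 => h.symm.trans h2, fun h2 => h.trans h2⟩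

-- Section 2: A's linear Fibonacci loop
theorem fibLoopA (m : Int) (k : Nat) :
    ((PySem.List.pyRange 0 (k : Int) 1).foldl
      (fun (ab : Int × Int) _ => (ab.2, PySem.Int.mod (ab.1 + ab.2) m)) (0, 1)).1
      ≡ (Nat.fib k : Int) [ZMOD m] ∧
    ((PySem.List.pyRange 0 (k : Int) 1).foldl
      (fun (ab : Int × Int) _ => (ab.2, PySem.Int.mod (ab.1 + ab.2) m)) (0, 1)).2
      ≡ (Nat.fib (k+1) : Int) [ZMOD m] := by
  induction k with
  | zero => simp [PySem.List.pyRange_one_eq_nil (by omega : (0:Int) ≤ 0)]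
  | succ k ih =>
    have hsplit : PySem.List.pyRange 0 ((k:Int)+1) 1
        = PySem.List.pyRange 0 (k:Int) 1 ++ [(k:Int)] :=
      PySem.List.pyRange_one_succ_right (by omega)
    push_cast
    rw [hsplit, List.foldl_append]
    obtain ⟨ha, hb⟩ := ih
    constructor
    · simpa using hb
    · simp only [List.foldl_cons, List.foldl_nil]
      have : (Nat.fib (k+2) : Int) = (Nat.fib k : Int) + (Nat.fib (k+1) : Int) := by
        have := Nat.fib_add_two (n := k); push_cast [this]; ring
      calc PySem.Int.mod (_ + _) m ≡ _ + _ [ZMOD m] := (pvModCongr _ m).symm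
        _ ≡ (Nat.fib k : Int) + (Nat.fib (k+1) : Int) [ZMOD m] := Int.ModEq.add ha hb
        _ = (Nat.fib (k+2) : Int) := this.symm

theorem fibModA_eq_zero_iff (d q : Int) (hd : 1 ≤ d) :
    (fibModA d q = 0) ↔ q ∣ (Nat.fib d.toNat : Int) := by
  unfold fibModA
  by_cases hq : q = 1
  · simp [hq]
  · rw [if_neg hq, if_neg (by omega : ¬ d ≤ 0)]
    have hk : d - 1 = ((d-1).toNat : Int) := by omega
    rw [hk]
    have h := (fibLoopA q (d-1).toNat).2
    have hfib : (d-1).toNat + 1 = d.toNat := by omega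
    rw [hfib] at h
    rw [PySem.Int.mod_eq_zero_iff_dvd]
    exact pvDvdIffOfModEq h

-- Section 3: B's fast-doubling Fibonacci
theorem fibPairB_spec (m : Int) (k : Nat) :
    (∃ x, (fibPairB k m).1 = PySem.Int.mod x m ∧ x ≡ (Nat.fib k : Int) [ZMOD m]) ∧
    (∃ y, (fibPairB k m).2 = PySem.Int.mod y m ∧ y ≡ (Nat.fib (k+1) : Int) [ZMOD m]) := by
  induction k using Nat.strong_induction_on with
  | _ k ih =>
    rw [fibPairB]
    by_cases hk : k = 0
    · subst hk
      refine ⟨⟨0, by simp, by simp [Int.ModEq.refl]⟩, ⟨1, by simp, by simp [Int.ModEq.refl]⟩⟩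
    · rw [if_neg hk]
      obtain ⟨⟨x, hx, hxe⟩, ⟨y, hy, hye⟩⟩ := ih (k/2) (by omega)
      set j := k / 2 with hj
      set ab := fibPairB j m with hab
      have hae : ab.1 ≡ (Nat.fib j : Int) [ZMOD m] := hx ▸ (pvModCongr x m).symm.trans hxe
      have hbe : ab.2 ≡ (Nat.fib (j+1) : Int) [ZMOD m] := hy ▸ (pvModCongr y m).symm.trans hye
      have hle : Nat.fib j ≤ 2 * Nat.fib (j+1) := le_trans (Nat.fib_le_fib_succ) (by omega)
      have idA : (Nat.fib (2*j) : Int) = (Nat.fib j : Int) * (2 * (Nat.fib (j+1) : Int) - (Nat.fib j : Int)) := by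
        have h := congrArg (Nat.cast : Nat → Int) (Nat.fib_two_mul j)
        push_cast [Nat.cast_sub hle] at h
        linarith [h]
      have idB : (Nat.fib (2*j+1) : Int) = (Nat.fib j : Int) * (Nat.fib j : Int) + (Nat.fib (j+1) : Int) * (Nat.fib (j+1) : Int) := by
        have h := congrArg (Nat.cast : Nat → Int) (Nat.fib_two_mul_add_one j)
        push_cast at h
        linarith [h]
      have hce : ab.1 * (2 * ab.2 - ab.1) ≡ (Nat.fib (2*j) : Int) [ZMOD m] := by
        rw [idA]
        exact Int.ModEq.mul hae (Int.ModEq.sub (Int.ModEq.mul_left 2 hbe) hae)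
      have hde : ab.1 * ab.1 + ab.2 * ab.2 ≡ (Nat.fib (2*j+1) : Int) [ZMOD m] := by
        rw [idB]
        exact Int.ModEq.add (Int.ModEq.mul hae hae) (Int.ModEq.mul hbe hbe)
      by_cases hpar : k % 2 = 0
      · rw [if_pos hpar]
        have h2j : 2 * j = k := by omega
        have h2j1 : 2 * j + 1 = k + 1 := by omega
        exact ⟨⟨_, rfl, h2j ▸ hce⟩, ⟨_, rfl, h2j1 ▸ hde⟩⟩
      · rw [if_neg hpar]
        have h2j1 : 2 * j + 1 = k := by omega
        refine ⟨⟨_, rfl, h2j1 ▸ hde⟩, ⟨_, rfl, ?_⟩⟩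
        have : (Nat.fib (k+1) : Int) = (Nat.fib (2*j) : Int) + (Nat.fib (2*j+1) : Int) := by
          have h2 : k + 1 = (2*j) + 2 := by omega
          rw [h2, Nat.fib_add_two]; push_cast; ring
        rw [this]
        exact Int.ModEq.add ((pvModCongr _ m).symm.trans hce) ((pvModCongr _ m).symm.trans hde)

theorem fibPairB_eq_zero_iff (k : Nat) (m : Int) :
    ((fibPairB k m).1 = 0) ↔ m ∣ (Nat.fib k : Int) := by
  obtain ⟨⟨x, hx, hxe⟩, -⟩ := fibPairB_spec m k
  rw [hx, PySem.Int.mod_eq_zero_iff_dvd]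
  exact pvDvdIffOfModEq hxe

-- Section 4: find? over sorted lists
theorem pvFindCongr {α} (l : List α) (p p' : α → Bool) (h : ∀ x ∈ l, p x = p' x) :
    l.find? p = l.find? p' := by
  induction l with
  | nil => rfl
  | cons a t ih =>
    simp only [List.find?_cons]
    rw [h a (by simp)]
    cases p' a
    · exact ih (fun x hx => h x (by simp [hx]))
    · rfl

theorem pvFindSortedMin (l : List Int) (p : Int → Bool) (hl : l.Pairwise (· ≤ ·)) (x : Int)
    (hx : l.find? p = some x) : ∀ y ∈ l, p y = true → x ≤ y := by
  induction l with
  | nil => simp at hx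
  | cons a t ih =>
    rw [List.find?_cons] at hx
    rcases List.pairwise_cons.1 hl with ⟨hall, ht⟩
    cases hpa : p a with
    | true =>
      rw [hpa] at hx
      simp at hx
      subst hx
      intro y hy _
      rcases List.mem_cons.1 hy with h | h
      · omega
      · exact hall y h
    | false =>
      rw [hpa] at hx
      intro y hy hpy
      rcases List.mem_cons.1 hy with h | h
      · subst h; rw [hpy] at hpa; exact absurd hpa (by simp)
      · exact ih ht hx y h hpy

theorem pvFindSortedEq (l1 l2 : List Int) (p : Int → Bool)
    (h1 : l1.Pairwise (· ≤ ·)) (h2 : l2.Pairwise (· ≤ ·))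
    (hmem : ∀ x, x ∈ l1 ↔ x ∈ l2) : l1.find? p = l2.find? p := by
  cases hf1 : l1.find? p with
  | none =>
    cases hf2 : l2.find? p with
    | none => rfl
    | some x =>
      have hx := List.find?_some hf2
      have hmx := List.mem_of_find?_eq_some hf2
      have := List.find?_eq_none.1 hf1 x ((hmem x).2 hmx)
      simp [hx] at this
  | some x =>
    have hx := List.find?_some hf1
    have hmx := List.mem_of_find?_eq_some hf1
    cases hf2 : l2.find? p with
    | none =>
      have := List.find?_eq_none.1 hf2 x ((hmem x).1 hmx)
      simp [hx] at this
    | some x' =>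
      have hx' := List.find?_some hf2
      have hmx' := List.mem_of_find?_eq_some hf2
      have hle : x ≤ x' := pvFindSortedMin l1 p h1 x hf1 x' ((hmem x').2 hmx') hx'
      have hge : x' ≤ x := pvFindSortedMin l2 p h2 x' hf2 x ((hmem x).1 hmx) hx
      rw [le_antisymm hle hge]
-- Section 5: B's divisor scan
theorem smallLoopB_eq (n i : Int) (acc : List Int) (hn : 0 ≤ n) (hi : 1 ≤ i) :
    smallLoopB n i acc = acc ++ (PySem.List.pyRange i ((Nat.sqrt n.toNat : Int) + 1) 1).filter
      (fun d => decide (PySem.Int.mod n d = 0)) := by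
  rw [smallLoopB]
  have e1 : (i.toNat : Int) = i := Int.toNat_of_nonneg (by omega)
  have e2 : (n.toNat : Int) = n := Int.toNat_of_nonneg hn
  by_cases h : i * i ≤ n
  · rw [dif_pos h]
    have h2 : i.toNat * i.toNat ≤ n.toNat := by
      have : ((i.toNat : Int)) * i.toNat ≤ (n.toNat : Int) := by rw [e1, e2]; exact h
      exact_mod_cast this
    have hle : i ≤ (Nat.sqrt n.toNat : Int) := by
      have := Nat.le_sqrt.2 h2; omega
    rw [PySem.List.pyRange_one_cons (by omega), List.filter_cons]
    rw [smallLoopB_eq n (i+1) _ hn (by omega)]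
    by_cases hm : PySem.Int.mod n i = 0
    · simp [hm]
    · simp [hm]
  · rw [dif_neg h]
    have hgt : (Nat.sqrt n.toNat : Int) + 1 ≤ i := by
      by_contra hc
      apply h
      have h3 : i.toNat ≤ Nat.sqrt n.toNat := by omega
      have h4 := Nat.le_sqrt.1 h3
      have : ((i.toNat * i.toNat : Nat) : Int) ≤ ((n.toNat : Nat) : Int) := by exact_mod_cast h4
      push_cast at this
      rw [e1, e2] at this
      exact this
    rw [PySem.List.pyRange_one_eq_nil hgt]
    simp
termination_by (n + 1 - i).toNat
decreasing_by
  have hin : i ≤ n := by nlinarith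
  omega

theorem pvSmallMem (n : Int) (hn : 1 ≤ n) (x : Int) :
    x ∈ smallLoopB n 1 [] ↔ 1 ≤ x ∧ x ≤ (Nat.sqrt n.toNat : Int) ∧ x ∣ n := by
  rw [smallLoopB_eq n 1 [] (by omega) (by omega)]
  simp only [List.nil_append, List.mem_filter, PySem.List.mem_pyRange_one, decide_eq_true_eq,
    PySem.Int.mod_eq_zero_iff_dvd]
  constructor
  · rintro ⟨⟨h1, h2⟩, h3⟩; exact ⟨h1, by omega, h3⟩
  · rintro ⟨h1, h2, h3⟩; exact ⟨⟨h1, by omega⟩, h3⟩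
theorem pvSmallPairwise (n : Int) (hn : 1 ≤ n) : (smallLoopB n 1 []).Pairwise (· < ·) := by
  rw [smallLoopB_eq n 1 [] (by omega) (by omega)]
  simpa using List.Pairwise.filter _ (PySem.List.pairwise_lt_pyRange_one 1 _)
-- the list B scans (exactly the let-expansion inside alpha_for_Fn_divisor_alt)
def pvDivsB (n : Int) : List Int :=
  smallLoopB n 1 [] ++
    (((smallLoopB n 1 []).reverse.filter (fun d => PySem.Int.floordiv n d ≠ d)).map
      (fun d => PySem.Int.floordiv n d))

theorem pvFloordivCast (n d : Int) (hn : 0 ≤ n) (hd : 0 ≤ d) :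
    PySem.Int.floordiv n d = ((n.toNat / d.toNat : Nat) : Int) := by
  conv_lhs => rw [← Int.toNat_of_nonneg hn, ← Int.toNat_of_nonneg hd]
  exact PySem.Int.floordiv_natCast n.toNat d.toNat

theorem pvDvdCast (n d : Int) (hn : 0 ≤ n) (hd : 0 ≤ d) (h : d ∣ n) : d.toNat ∣ n.toNat := by
  rw [← Int.natCast_dvd_natCast]
  rw [Int.toNat_of_nonneg hn, Int.toNat_of_nonneg hd]
  exact h

theorem pvDivsBMem (n : Int) (hn : 1 ≤ n) (x : Int) : x ∈ pvDivsB n ↔ 0 < x ∧ x ∣ n := by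
  constructor
  · intro hx
    rcases List.mem_append.1 hx with h | h
    · rw [pvSmallMem n hn] at h; exact ⟨by omega, h.2.2⟩
    · rcases List.mem_map.1 h with ⟨d, hd, rfl⟩
      have hdm := List.mem_of_mem_filter hd
      rw [List.mem_reverse, pvSmallMem n hn] at hdm
      obtain ⟨h1, h2, h3⟩ := hdm
      rw [pvFloordivCast n d (by omega) (by omega)]
      have hdvd : d.toNat ∣ n.toNat := pvDvdCast n d (by omega) (by omega) h3
      have hdd := Nat.div_dvd_of_dvd hdvd
      have hpos : 0 < n.toNat / d.toNat :=
        Nat.div_pos (Nat.le_of_dvd (by omega) hdvd) (by omega)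
      refine ⟨by exact_mod_cast hpos, ?_⟩
      rw [← Int.toNat_of_nonneg (show (0:Int) ≤ n by omega)]
      exact_mod_cast hdd
  · rintro ⟨hx0, hxd⟩
    have hXd : x.toNat ∣ n.toNat := pvDvdCast n x (by omega) (by omega) hxd
    have hXle : x.toNat ≤ n.toNat := Nat.le_of_dvd (by omega) hXd
    by_cases hc : x ≤ (Nat.sqrt n.toNat : Int)
    · exact List.mem_append.2 (.inl ((pvSmallMem n hn x).2 ⟨by omega, hc, hxd⟩))
    · refine List.mem_append.2 (.inr ?_)
      set N := n.toNat with hN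
      set X := x.toNat with hX
      have hDdvd : N / X ∣ N := Nat.div_dvd_of_dvd hXd
      have hD1 : 1 ≤ N / X := (Nat.one_le_div_iff (by omega)).2 hXle
      have hDX : N / X * X = N := Nat.div_mul_cancel hXd
      have hsq1 := Nat.lt_succ_sqrt N
      have hXgt : Nat.sqrt N < X := by omega
      have hDle : N / X ≤ Nat.sqrt N := by nlinarith
      have hdmem : ((N / X : Nat) : Int) ∈ smallLoopB n 1 [] := by
        rw [pvSmallMem n hn]
        refine ⟨by exact_mod_cast hD1, by exact_mod_cast hDle, ?_⟩
        rw [← Int.toNat_of_nonneg (show (0:Int) ≤ n by omega)]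
        exact_mod_cast hDdvd
      have hfd : PySem.Int.floordiv n ((N / X : Nat) : Int) = x := by
        rw [pvFloordivCast n _ (by omega) (by positivity)]
        rw [Int.toNat_natCast]
        rw [Nat.div_div_self hXd (by omega)]
        omega
      refine List.mem_map.2 ⟨((N / X : Nat) : Int), List.mem_filter.2 ⟨List.mem_reverse.2 hdmem, ?_⟩, hfd⟩
      rw [hfd]
      simp only [decide_eq_true_eq]
      intro hcon
      rw [hcon] at hc
      exact hc (by exact_mod_cast hDle)

theorem pvDivsBPairwise (n : Int) (hn : 1 ≤ n) : (pvDivsB n).Pairwise (· ≤ ·) := by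
  have hsp := pvSmallPairwise n hn
  have hmemsq : ∀ y ∈ smallLoopB n 1 [], 1 ≤ y ∧ y ≤ (Nat.sqrt n.toNat : Int) ∧ y ∣ n :=
    fun y hy => (pvSmallMem n hn y).1 hy
  rw [pvDivsB, List.pairwise_append]
  refine ⟨hsp.imp (fun h => le_of_lt h), ?_, ?_⟩
  · rw [List.pairwise_map]
    have hrev : (smallLoopB n 1 []).reverse.Pairwise (fun a b => b < a) :=
      List.pairwise_reverse.2 hsp
    have hf := List.Pairwise.filter (fun d => decide (PySem.Int.floordiv n d ≠ d)) hrev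
    refine hf.imp_of_mem ?_
    intro a b ha hb hr
    have ha2 := hmemsq a (List.mem_reverse.1 (List.mem_of_mem_filter ha))
    have hb2 := hmemsq b (List.mem_reverse.1 (List.mem_of_mem_filter hb))
    rw [pvFloordivCast n a (by omega) (by omega), pvFloordivCast n b (by omega) (by omega)]
    have : n.toNat / a.toNat ≤ n.toNat / b.toNat :=
      Nat.div_le_div_left (by omega) (by omega)
    exact_mod_cast this
  · intro a ha b hb
    rcases List.mem_map.1 hb with ⟨d, hd, rfl⟩
    have ha2 := hmemsq a ha
    have hd2 := hmemsq d (List.mem_reverse.1 (List.mem_of_mem_filter hd))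
    rw [pvFloordivCast n d (by omega) (by omega)]
    have hsq := Nat.sqrt_le n.toNat
    have h1 : a.toNat * d.toNat ≤ n.toNat := by
      have haN : a.toNat ≤ Nat.sqrt n.toNat := by omega
      have hdN : d.toNat ≤ Nat.sqrt n.toNat := by omega
      calc a.toNat * d.toNat ≤ Nat.sqrt n.toNat * Nat.sqrt n.toNat :=
            Nat.mul_le_mul haN hdN
        _ ≤ n.toNat := hsq
    have h2 : a.toNat ≤ n.toNat / d.toNat := (Nat.le_div_iff_mul_le (by omega)).2 h1
    omega
-- Section 6: A's factorization produces exactly the divisors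
theorem divideOutA_spec (n d e : Int) (hd : 2 ≤ d) (hn : 1 ≤ n) :
    ∃ j : Nat, (divideOutA n d e).2 = e + j ∧
      (divideOutA n d e).1 * d ^ j = n ∧
      1 ≤ (divideOutA n d e).1 ∧
      ¬ d ∣ (divideOutA n d e).1 ∧
      (PySem.Int.mod n d = 0 → 1 ≤ j) := by
  rw [divideOutA]
  by_cases hc : 2 ≤ d ∧ 1 ≤ n ∧ PySem.Int.mod n d = 0
  · rw [dif_pos hc]
    have hdvd : d ∣ n := (PySem.Int.mod_eq_zero_iff_dvd n d).1 hc.2.2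
    have hfd : PySem.Int.floordiv n d = n / d := PySem.Int.floordiv_eq_ediv_of_pos (by omega)
    have hcancel : n / d * d = n := Int.ediv_mul_cancel hdvd
    have hn' : 1 ≤ n / d := by
      rcases Int.lt_or_le (n / d) 1 with h | h
      · nlinarith
      · exact h
    obtain ⟨j, h1, h2, h3, h4, h5⟩ := divideOutA_spec (PySem.Int.floordiv n d) d (e + 1) hd (hfd ▸ hn')
    refine ⟨j + 1, by omega, ?_, h3, h4, fun _ => by omega⟩
    rw [pow_succ, ← mul_assoc, h2, hfd, hcancel]
  · rw [dif_neg hc]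
    have hm : ¬ PySem.Int.mod n d = 0 := fun h => hc ⟨hd, hn, h⟩
    refine ⟨0, by omega, by simp, hn, ?_, fun h => absurd h hm⟩
    intro hdvd
    exact hm ((PySem.Int.mod_eq_zero_iff_dvd n d).2 hdvd)
termination_by n.toNat
decreasing_by
  obtain ⟨hd2, hn2, hm2⟩ := hc
  have h2 : PySem.Int.floordiv n d = n / d := PySem.Int.floordiv_eq_ediv_of_pos (by omega)
  have h3 : n / d < n := pvEdivLt n d hn2 hd2
  have h4 : 0 ≤ n / d := Int.ediv_nonneg (by omega) (by omega)
  omega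

def pvProd (L : List (Int × Int)) : Int := (L.map (fun pe => pe.1 ^ pe.2.toNat)).prod

theorem pvProd_append (L1 L2 : List (Int × Int)) : pvProd (L1 ++ L2) = pvProd L1 * pvProd L2 := by
  simp [pvProd]

theorem factorizeLoopA_spec (n d : Int) (acc : List (Int × Int)) (hd : 2 ≤ d) (hn : 1 ≤ n)
    (hsmall : ∀ k : Int, 2 ≤ k → k < d → ¬ k ∣ n) :
    ∃ L, (factorizeLoopA n d acc).1 = acc ++ L ∧
      pvProd L * (factorizeLoopA n d acc).2 = n ∧
      (∀ pe ∈ L, 2 ≤ pe.1 ∧ Prime pe.1 ∧ 1 ≤ pe.2) ∧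
      1 ≤ (factorizeLoopA n d acc).2 ∧
      ((factorizeLoopA n d acc).2 = 1 ∨ Prime (factorizeLoopA n d acc).2) := by
  rw [factorizeLoopA]
  by_cases hdd : d * d ≤ n
  · rw [dif_pos hdd]
    by_cases hm : PySem.Int.mod n d = 0
    · rw [if_pos hm]
      have hdvdn : d ∣ n := (PySem.Int.mod_eq_zero_iff_dvd n d).1 hm
      -- d is prime: no k in [2, d) divides n ⊇ divisors of d
      have hdprime : Prime d := by
        rw [Int.prime_iff_natAbs_prime]
        rw [Nat.prime_def_lt]
        refine ⟨by omega, ?_⟩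
        intro m hmlt hmdvd
        by_contra hm1
        have hm0 : m ≠ 0 := by
          rintro rfl
          simp at hmdvd
          omega
        have hm2 : 2 ≤ m := by omega
        have hmd : (m : Int) ∣ d := by
          have : (m : Int) ∣ (d.natAbs : Int) := Int.natCast_dvd_natCast.2 hmdvd
          rwa [Int.natAbs_of_nonneg (by omega)] at this
        exact hsmall m (by exact_mod_cast hm2) (by omega) (hmd.trans hdvdn)
      obtain ⟨j, he, hprod, hpos, hnd, hj1⟩ := divideOutA_spec n d 0 hd hn
      set r := divideOutA n d 0 with hr
      have hsmall' : ∀ k : Int, 2 ≤ k → k < d + 1 → ¬ k ∣ r.1 := by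
        intro k hk2 hklt hkdvd
        rcases Int.lt_or_le k d with hlt | hge
        · have hr1n : r.1 ∣ n := ⟨d ^ j, hprod.symm⟩
          exact hsmall k hk2 hlt (hkdvd.trans hr1n)
        · have hkd : k = d := by omega
          exact hnd (hkd ▸ hkdvd)
      obtain ⟨L', hL1, hL2, hL3, hL4, hL5⟩ :=
        factorizeLoopA_spec r.1 (d + 1) (acc ++ [(d, r.2)]) (by omega) hpos hsmall'
      refine ⟨(d, r.2) :: L', by simpa using hL1, ?_, ?_, hL4, hL5⟩
      · have hjr : r.2.toNat = j := by omega
        have : pvProd ((d, r.2) :: L') = d ^ j * pvProd L' := by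
          simp [pvProd, hjr]
        rw [this, mul_assoc, hL2]
        linarith [hprod]
      · intro pe hpe
        rcases List.mem_cons.1 hpe with rfl | hpe2
        · exact ⟨hd, hdprime, by have := hj1 hm; omega⟩
        · exact hL3 pe hpe2
    · rw [if_neg hm]
      have hnd : ¬ d ∣ n := fun h => hm ((PySem.Int.mod_eq_zero_iff_dvd n d).2 h)
      have hsmall' : ∀ k : Int, 2 ≤ k → k < d + 1 → ¬ k ∣ n := by
        intro k hk2 hklt
        rcases Int.lt_or_le k d with hlt | hge
        · exact hsmall k hk2 hlt
        · have : k = d := by omega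
          exact this ▸ hnd
      exact factorizeLoopA_spec n (d + 1) acc (by omega) hn hsmall'
  · rw [dif_neg hdd]
    refine ⟨[], by simp, by simp [pvProd], by simp, hn, ?_⟩
    by_cases h1 : n = 1
    · exact .inl h1
    · refine .inr ?_
      rw [Int.prime_iff_natAbs_prime, Nat.prime_def_le_sqrt]
      have hnn : (n.natAbs : Int) = n := Int.natAbs_of_nonneg (by omega)
      refine ⟨by omega, ?_⟩
      intro m hm2 hmsqrt hmdvd
      have hmm : m * m ≤ n.natAbs :=
        le_trans (Nat.mul_le_mul hmsqrt hmsqrt) (Nat.sqrt_le n.natAbs)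
      have hmmI : (m : Int) * m ≤ n := by
        have : ((m * m : Nat) : Int) ≤ (n.natAbs : Int) := by exact_mod_cast hmm
        push_cast at this
        omega
      have hmltd : (m : Int) < d := by nlinarith
      refine hsmall m (by exact_mod_cast hm2) hmltd ?_
      have : (m : Int) ∣ (n.natAbs : Int) := Int.natCast_dvd_natCast.2 hmdvd
      rwa [hnn] at this
termination_by (n + 1 - d).toNat
decreasing_by
  · have hdn : d ≤ n := by nlinarith [sq_nonneg d, sq_nonneg (d - 1)]
    have := divideOutA_fst_le n d 0
    omega
  · have hdn : d ≤ n := by nlinarith [sq_nonneg d, sq_nonneg (d - 1)]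
    omega

theorem factorizeA_spec (n : Int) (hn : 2 ≤ n) :
    pvProd (factorizeA n) = n ∧ ∀ pe ∈ factorizeA n, 2 ≤ pe.1 ∧ Prime pe.1 ∧ 1 ≤ pe.2 := by
  unfold factorizeA
  rw [if_neg (by omega)]
  show pvProd (if 1 < (factorizeLoopA n 2 []).2 then (factorizeLoopA n 2 []).1 ++ [((factorizeLoopA n 2 []).2, 1)] else (factorizeLoopA n 2 []).1) = n ∧
    ∀ pe ∈ (if 1 < (factorizeLoopA n 2 []).2 then (factorizeLoopA n 2 []).1 ++ [((factorizeLoopA n 2 []).2, 1)] else (factorizeLoopA n 2 []).1), 2 ≤ pe.1 ∧ Prime pe.1 ∧ 1 ≤ pe.2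
  obtain ⟨L, h1, h2, h3, h4, h5⟩ := factorizeLoopA_spec n 2 [] (by omega) (by omega) (by omega)
  set r := factorizeLoopA n 2 [] with hrdef
  rw [h1]
  simp only [List.nil_append]
  by_cases hr1 : 1 < r.2
  · rw [if_pos hr1]
    constructor
    · rw [pvProd_append]
      have : pvProd [(r.2, 1)] = r.2 := by simp [pvProd]
      rw [this]
      exact h2
    · intro pe hpe
      rcases List.mem_append.1 hpe with h | h
      · exact h3 pe h
      · rcases List.mem_singleton.1 h with rfl
        rcases h5 with h5 | h5
        · omega
        · exact ⟨by omega, h5, by omega⟩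
  · rw [if_neg hr1]
    have : r.2 = 1 := by omega
    rw [this, mul_one] at h2
    exact ⟨h2, h3⟩
theorem pvInnerFold (p d : Int) (m : Nat) (nd : List Int) (pe0 : Int) :
    ((PySem.List.pyRange 0 (m : Int) 1).foldl
      (fun (st : List Int × Int) _ => (st.1 ++ [d * st.2], st.2 * p)) (nd, pe0))
    = (nd ++ (List.range m).map (fun j => d * (pe0 * p ^ j)), pe0 * p ^ m) := by
  induction m generalizing nd pe0 with
  | zero => simp [PySem.List.pyRange_one_eq_nil (by omega : (0:Int) ≤ 0)]
  | succ m ih =>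
    have hsplit : PySem.List.pyRange 0 ((m:Int)+1) 1
        = PySem.List.pyRange 0 (m:Int) 1 ++ [(m:Int)] :=
      PySem.List.pyRange_one_succ_right (by omega)
    push_cast
    rw [hsplit, List.foldl_append, ih]
    simp only [List.foldl_cons, List.foldl_nil, List.range_succ, List.map_append, List.map_cons,
      List.map_nil, List.append_assoc]
    rw [Prod.mk.injEq]
    exact ⟨by simp, by ring⟩

-- one (p, e) step of get_divisors' outer loop
theorem pvStepMem (p e : Int) (he : 0 ≤ e) (divs : List Int) (x : Int) :
    x ∈ divs.foldl (fun nd d =>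
          ((PySem.List.pyRange 0 (e + 1) 1).foldl
            (fun (st : List Int × Int) _ => (st.1 ++ [d * st.2], st.2 * p)) (nd, 1)).1) []
      ↔ ∃ d ∈ divs, ∃ j ≤ e.toNat, x = d * p ^ j := by
  have hcast : e + 1 = ((e.toNat + 1 : Nat) : Int) := by omega
  have hstep : ∀ (acc : List Int) (d : Int), d ∈ divs →
      ((PySem.List.pyRange 0 (e + 1) 1).foldl
        (fun (st : List Int × Int) _ => (st.1 ++ [d * st.2], st.2 * p)) (acc, 1)).1
        = acc ++ (List.range (e.toNat + 1)).map (fun j => d * (1 * p ^ j)) := by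
    intro acc d _
    rw [hcast, pvInnerFold p d (e.toNat + 1) acc 1]
  have hcongr := PySem.List.foldl_congr_mem (l := divs) (init := ([] : List Int))
    (f := fun nd d => ((PySem.List.pyRange 0 (e + 1) 1).foldl
      (fun (st : List Int × Int) _ => (st.1 ++ [d * st.2], st.2 * p)) (nd, 1)).1)
    (g := fun nd d => nd ++ (List.range (e.toNat + 1)).map (fun j => d * (1 * p ^ j))) hstep
  rw [hcongr]
  rw [PySem.List.foldl_append_eq_flatMap]
  simp only [List.nil_append, List.mem_flatMap, List.mem_map, List.mem_range, one_mul]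
  constructor
  · rintro ⟨d, hd, j, hj, rfl⟩
    exact ⟨d, hd, j, by omega, rfl⟩
  · rintro ⟨d, hd, j, hj, rfl⟩
    exact ⟨d, hd, j, by omega, rfl⟩

theorem pvDvdMulPrimePow (M p : Int) (e : Nat) (hM : 0 < M) (hp2 : 2 ≤ p) (hp : Prime p) (y : Int) :
    (0 < y ∧ y ∣ M * p ^ e) ↔ ∃ x, (0 < x ∧ x ∣ M) ∧ ∃ j ≤ e, y = x * p ^ j := by
  have hpN : Nat.Prime p.toNat := by
    rw [Int.prime_iff_natAbs_prime] at hp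
    have heq : p.natAbs = p.toNat := by omega
    rwa [heq] at hp
  constructor
  · rintro ⟨hy0, hyd⟩
    have hcast2 : ((M.toNat * p.toNat ^ e : Nat) : Int) = M * p ^ e := by
      push_cast
      rw [Int.toNat_of_nonneg (by omega : (0:Int) ≤ M), Int.toNat_of_nonneg (by omega : (0:Int) ≤ p)]
    have hyN : y.toNat ∣ M.toNat * p.toNat ^ e := by
      rw [← Int.natCast_dvd_natCast, hcast2, Int.toNat_of_nonneg (by omega : (0:Int) ≤ y)]
      exact hyd
    obtain ⟨a, b, ha, hb, hab⟩ := Nat.dvd_mul.1 hyN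
    obtain ⟨j, hj, rfl⟩ := (Nat.dvd_prime_pow hpN).1 hb
    have ha0 : 0 < a := by
      rcases Nat.eq_zero_or_pos a with rfl | h
      · simp at hab; omega
      · exact h
    refine ⟨(a : Int), ⟨by exact_mod_cast ha0, ?_⟩, j, hj, ?_⟩
    · have : (a : Int) ∣ (M.toNat : Int) := Int.natCast_dvd_natCast.2 ha
      rwa [Int.toNat_of_nonneg (by omega)] at this
    · have h2 : ((a * p.toNat ^ j : Nat) : Int) = y := by
        rw [hab, Int.toNat_of_nonneg (by omega : (0:Int) ≤ y)]
      push_cast at h2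
      rw [Int.toNat_of_nonneg (by omega : (0:Int) ≤ p)] at h2
      exact h2.symm
  · rintro ⟨x, ⟨hx0, hxd⟩, j, hj, rfl⟩
    have hppos : (0:Int) < p ^ j := by positivity
    exact ⟨by positivity, mul_dvd_mul hxd (pow_dvd_pow p hj)⟩
theorem pvOuterFold (L : List (Int × Int)) (hfacts : ∀ pe ∈ L, 2 ≤ pe.1 ∧ Prime pe.1 ∧ 1 ≤ pe.2)
    (divs0 : List Int) (M0 : Int) (hM0 : 0 < M0) (hmem0 : ∀ x, x ∈ divs0 ↔ (0 < x ∧ x ∣ M0)) :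
    ∀ x, x ∈ L.foldl (fun divs pe =>
        divs.foldl (fun nd d =>
          ((PySem.List.pyRange 0 (pe.2 + 1) 1).foldl
            (fun (st : List Int × Int) _ => (st.1 ++ [d * st.2], st.2 * pe.1)) (nd, 1)).1) []) divs0
      ↔ (0 < x ∧ x ∣ M0 * pvProd L) := by
  induction L generalizing divs0 M0 with
  | nil => intro x; simp only [List.foldl_nil, pvProd, List.map_nil, List.prod_nil, mul_one]; exact hmem0 x
  | cons pe L ih =>
    obtain ⟨hp2, hpp, hpe1⟩ := hfacts pe (by simp)
    intro x
    rw [List.foldl_cons]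
    have hstepmem : ∀ y, y ∈ (divs0.foldl (fun nd d =>
        ((PySem.List.pyRange 0 (pe.2 + 1) 1).foldl
          (fun (st : List Int × Int) _ => (st.1 ++ [d * st.2], st.2 * pe.1)) (nd, 1)).1) [])
        ↔ (0 < y ∧ y ∣ M0 * pe.1 ^ pe.2.toNat) := by
      intro y
      rw [pvStepMem pe.1 pe.2 (by omega) divs0 y]
      rw [pvDvdMulPrimePow M0 pe.1 pe.2.toNat hM0 hp2 hpp y]
      constructor
      · rintro ⟨d, hd, j, hj, rfl⟩
        exact ⟨d, (hmem0 d).1 hd, j, hj, rfl⟩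
      · rintro ⟨d, hd, j, hj, rfl⟩
        exact ⟨d, (hmem0 d).2 hd, j, hj, rfl⟩
    have := ih (fun q hq => hfacts q (by simp [hq])) _ (M0 * pe.1 ^ pe.2.toNat)
      (by positivity) hstepmem x
    rw [this]
    have hprod : M0 * pe.1 ^ pe.2.toNat * pvProd L = M0 * pvProd (pe :: L) := by
      simp only [pvProd, List.map_cons, List.prod_cons]
      ring
    rw [hprod]

theorem pvGetDivisorsAMem (n : Int) (hn : 1 ≤ n) (x : Int) :
    x ∈ getDivisorsA n ↔ 0 < x ∧ x ∣ n := by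
  unfold getDivisorsA
  rw [if_neg (by omega)]
  by_cases h1 : n = 1
  · rw [if_pos h1]
    subst h1
    simp only [List.mem_singleton]
    constructor
    · rintro rfl; exact ⟨by omega, dvd_refl 1⟩
    · rintro ⟨h2, h3⟩; exact Int.eq_one_of_dvd_one (by omega) h3
  · rw [if_neg h1]
    obtain ⟨hprod, hfacts⟩ := factorizeA_spec n (by omega)
    rw [PySem.List.mem_sorted]
    have := pvOuterFold (factorizeA n) hfacts [1] 1 (by omega)
      (by intro y
          simp only [List.mem_singleton]
          constructor
          · rintro rfl; exact ⟨by omega, dvd_refl 1⟩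
          · rintro ⟨h2, h3⟩; exact Int.eq_one_of_dvd_one (by omega) h3) x
    rw [this, hprod, one_mul]
theorem pvMain (q n : Int) :
    alpha_for_Fn_divisor q n = alpha_for_Fn_divisor_alt q n := by
  by_cases hq1 : q = 1
  · rw [alpha_for_Fn_divisor, alpha_for_Fn_divisor_alt, if_pos hq1, if_pos hq1]
  · by_cases hn0 : n ≤ 0
    · have hA : alpha_for_Fn_divisor q n = n := by
        rw [alpha_for_Fn_divisor, if_neg hq1]
        have hgd : getDivisorsA n = [] := by rw [getDivisorsA, if_pos hn0]
        show (match (PySem.List.sorted (getDivisorsA n) (fun x => x) false).find?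
            (fun d => decide (1 ≤ d) && decide (fibModA d q = 0)) with
          | some d => d | none => n) = n
        rw [hgd]
        rfl
      have hB : alpha_for_Fn_divisor_alt q n = n := by
        rw [alpha_for_Fn_divisor_alt, if_neg hq1, if_pos hn0]
      rw [hA, hB]
    · have hn1 : 1 ≤ n := by omega
      have eqA : alpha_for_Fn_divisor q n =
          (match (PySem.List.sorted (getDivisorsA n) (fun x => x) false).find?
            (fun d => decide (1 ≤ d) && decide (fibModA d q = 0)) with
          | some d => d | none => n) := by
        rw [alpha_for_Fn_divisor, if_neg hq1]
      have eqB : alpha_for_Fn_divisor_alt q n =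
          (match (pvDivsB n).find? (fun d => decide ((fibPairB d.toNat q).1 = 0)) with
          | some d => d | none => n) := by
        rw [alpha_for_Fn_divisor_alt, if_neg hq1, if_neg hn0]
        rfl
      rw [eqA, eqB]
      set l1 := PySem.List.sorted (getDivisorsA n) (fun x => x) false with hl1
      have h1mem : ∀ x, x ∈ l1 ↔ (0 < x ∧ x ∣ n) := by
        intro x
        rw [hl1, PySem.List.mem_sorted]
        exact pvGetDivisorsAMem n hn1 x
      have h2mem := pvDivsBMem n hn1
      have hfindA : l1.find? (fun d => decide (1 ≤ d) && decide (fibModA d q = 0))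
          = l1.find? (fun d => decide (q ∣ (Nat.fib d.toNat : Int))) := by
        apply pvFindCongr
        intro x hx
        have hx0 : 0 < x := ((h1mem x).1 hx).1
        rw [decide_eq_true (by omega : 1 ≤ x), Bool.true_and]
        exact decide_eq_decide.2 (fibModA_eq_zero_iff x q (by omega))
      have hfindB : (pvDivsB n).find? (fun d => decide ((fibPairB d.toNat q).1 = 0))
          = (pvDivsB n).find? (fun d => decide (q ∣ (Nat.fib d.toNat : Int))) := by
        apply pvFindCongr
        intro x hx
        exact decide_eq_decide.2 (fibPairB_eq_zero_iff x.toNat q)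
      have hs1 : l1.Pairwise (· ≤ ·) := by
        have := PySem.List.sorted_pairwise (getDivisorsA n) (fun x => x)
        exact this.imp (fun h => h)
      have hs2 := pvDivsBPairwise n hn1
      have hmemiff : ∀ x, x ∈ l1 ↔ x ∈ pvDivsB n := by
        intro x
        rw [h1mem x, h2mem x]
      have hcore := pvFindSortedEq l1 (pvDivsB n)
        (fun d => decide (q ∣ (Nat.fib d.toNat : Int))) hs1 hs2 hmemiff
      rw [hfindA, hfindB, hcore]

-- ===== VERDICT (by name: the statement is the Claim_ definition above) =====
theorem alpha_for_Fn_divisor_spec : Claim_equal_alpha_for_Fn_divisor := by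
  intro q n _ _
  unfold Spec_alpha_for_Fn_divisor
  exact pvMain q n
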